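-- pv_equiv track=rewrite | github.com/Gabe-Kelly01/py_babbage | babbageAdder.py | babbageAdder
-- ===== SOURCE A (Python) =====
-- def babbageAdder(addend, accumulator):
--     #loops till addend is 0, if accumulator > 9 then carry = 1
--     carry = 0
--     while(addend != 0):
--         accumulator = accumulator + 1
--         addend = addend - 1
--         if accumulator > 9:
--             carry = 1
--             accumulator = 0
--     returnArray = [addend, accumulator, carry]
--     return returnArray
-- ===== SOURCE B (Python) =====
-- def babbageAdder(addend, accumulator):
--     # O(1) closed form instead of repeated increment
--     if addend == 0:
--         return [0, accumulator, 0]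
--     s = max(1, 10 - accumulator)  # steps until the first overflow/reset
--     if addend < s:
--         return [0, accumulator + addend, 0]
--     return [0, (addend - s) % 10, 1]
-- ===== Notes on version B (the rewrite author's own statement) =====
-- stated objective: faster
-- what changed: Replaced the step-by-step increment loop with a closed-form computation of the steps to the first overflow and a modulo for the rest.
import Mathlib
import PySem

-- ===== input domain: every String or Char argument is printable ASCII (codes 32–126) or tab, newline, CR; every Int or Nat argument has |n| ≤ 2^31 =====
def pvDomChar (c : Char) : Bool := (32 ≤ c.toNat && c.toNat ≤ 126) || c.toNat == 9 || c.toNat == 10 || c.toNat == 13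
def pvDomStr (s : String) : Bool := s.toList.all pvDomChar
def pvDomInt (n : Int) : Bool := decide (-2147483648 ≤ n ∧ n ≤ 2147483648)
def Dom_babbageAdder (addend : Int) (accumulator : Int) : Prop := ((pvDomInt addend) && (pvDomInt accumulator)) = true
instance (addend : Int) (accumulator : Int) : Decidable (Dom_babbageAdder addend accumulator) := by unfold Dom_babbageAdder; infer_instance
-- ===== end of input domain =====

-- B replaces A's step-by-step increment loop with an O(1) closed form (steps to first overflow, then a modulo).


-- ===== PORT A =====
-- A's while loop; the fuel equals addend.toNat, which is exactly the number of
-- iterations the Python loop performs whenever it terminates (i.e. addend ≥ 0).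
def babbageLoop : Nat → Int → Int → Int → List Int
  | 0, addend, accumulator, carry => [addend, accumulator, carry]
  | n+1, addend, accumulator, carry =>
    if addend ≠ 0 then
      let accumulator' := accumulator + 1
      let addend' := addend - 1
      if accumulator' > 9 then babbageLoop n addend' 0 1
      else babbageLoop n addend' accumulator' carry
    else [addend, accumulator, carry]

def babbageAdder (addend : Int) (accumulator : Int) : List Int :=
  babbageLoop addend.toNat addend accumulator 0

-- ===== PORT B =====
def babbageAdder_alt (addend : Int) (accumulator : Int) : List Int :=
  if addend = 0 then [0, accumulator, 0]
  else
    let s := max 1 (10 - accumulator)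
    if addend < s then [0, accumulator + addend, 0]
    else [0, PySem.Int.mod (addend - s) 10, 1]

-- ===== PRECONDITION & SPEC =====
-- A's while loop never terminates for a negative addend, so those inputs are excluded.
def Pre_babbageAdder (addend : Int) (accumulator : Int) : Prop := 0 ≤ addend
instance (addend : Int) (accumulator : Int) : Decidable (Pre_babbageAdder addend accumulator) := by unfold Pre_babbageAdder; infer_instance
def pvWitness_babbageAdder : Int × Int := (37, 5)

def Spec_babbageAdder (addend : Int) (accumulator : Int) (out : List Int) : Prop := out = babbageAdder_alt addend accumulator
instance (addend : Int) (accumulator : Int) (out : List Int) : Decidable (Spec_babbageAdder addend accumulator out) := by unfold Spec_babbageAdder; infer_instance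

-- ===== CLAIM (what is proved, stated in full; the proofs are below) =====
def Claim_equal_babbageAdder : Prop := ∀ (addend : Int) (accumulator : Int), Dom_babbageAdder addend accumulator → Pre_babbageAdder addend accumulator → Spec_babbageAdder addend accumulator (babbageAdder addend accumulator)

-- ===== LEMMAS AND PROOFS =====

-- After the first overflow: carry = 1, accumulator in [0,9]; remaining n steps give (acc + n) % 10.
theorem babbageLoop_carry (n : Nat) : ∀ (acc : Int), 0 ≤ acc → acc ≤ 9 →
    babbageLoop n (n : Int) acc 1 = [0, (acc + n) % 10, 1] := by
  induction n with
  | zero =>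
    intro acc h0 h9
    simp only [babbageLoop, Nat.cast_zero]
    simp only [List.cons.injEq, true_and, and_true]; omega
  | succ n ih =>
    intro acc h0 h9
    have hne : ((n : Int) + 1) ≠ 0 := by positivity
    simp only [babbageLoop, Nat.cast_add, Nat.cast_one]
    rw [if_pos hne]
    simp only [add_sub_cancel_right]
    by_cases hov : acc + 1 > 9
    · rw [if_pos hov, ih 0 le_rfl (by norm_num)]
      have hacc : acc = 9 := by omega
      subst hacc
      simp only [List.cons.injEq, true_and, and_true]; omega
    · rw [if_neg hov, ih (acc + 1) (by omega) (by omega)]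
      simp only [List.cons.injEq, true_and, and_true]; omega

-- Before any overflow: carry = 0, arbitrary accumulator; full closed form.
theorem babbageLoop_closed (n : Nat) : ∀ (acc : Int),
    babbageLoop n (n : Int) acc 0 =
      if (n : Int) = 0 then [0, acc, 0]
      else if (n : Int) < max 1 (10 - acc) then [0, acc + n, 0]
      else [0, ((n : Int) - max 1 (10 - acc)) % 10, 1] := by
  induction n with
  | zero => intro acc; simp [babbageLoop]
  | succ n ih =>
    intro acc
    have hne : ((n : Int) + 1) ≠ 0 := by positivity
    simp only [babbageLoop, Nat.cast_add, Nat.cast_one]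
    rw [if_pos hne, if_neg hne]
    simp only [add_sub_cancel_right]
    by_cases hov : acc + 1 > 9
    · -- overflow on the first step: acc ≥ 9, so max 1 (10 - acc) = 1
      rw [if_pos hov, babbageLoop_carry n 0 le_rfl (by norm_num)]
      have hmax : max 1 (10 - acc) = 1 := by omega
      rw [hmax, if_neg (by omega : ¬ ((n : Int) + 1 < 1))]
      simp only [List.cons.injEq, true_and, and_true]; omega
    · -- no overflow yet: continue with acc + 1
      rw [if_neg hov, ih (acc + 1)]
      by_cases hn : (n : Int) = 0
      · rw [if_pos hn, if_pos (by omega : (n : Int) + 1 < max 1 (10 - acc))]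
        simp only [List.cons.injEq, true_and, and_true]; omega
      · have hmax' : max 1 (10 - (acc + 1)) = 9 - acc := by omega
        have hmax : max 1 (10 - acc) = 10 - acc := by omega
        rw [if_neg hn, hmax', hmax]
        by_cases hlt : (n : Int) < 9 - acc
        · rw [if_pos hlt, if_pos (by omega)]
          simp only [List.cons.injEq, true_and, and_true]; omega
        · rw [if_neg hlt, if_neg (by omega)]
          simp only [List.cons.injEq, true_and, and_true]; omega

-- ===== VERDICT (by name: the statement is the Claim_ definition above) =====
theorem babbageAdder_spec : Claim_equal_babbageAdder := by
  intro addend accumulator _ hpre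
  unfold Spec_babbageAdder babbageAdder babbageAdder_alt
  have hcast : ((addend.toNat : Nat) : Int) = addend := Int.toNat_of_nonneg hpre
  rw [show babbageLoop addend.toNat addend accumulator 0
        = babbageLoop addend.toNat ((addend.toNat : Nat) : Int) accumulator 0 by rw [hcast],
     babbageLoop_closed addend.toNat accumulator, hcast]
  by_cases h0 : addend = 0
  · simp [h0]
  · rw [if_neg h0, if_neg h0]
    by_cases hlt : addend < max 1 (10 - accumulator)
    · rw [if_pos hlt, if_pos hlt]
    · rw [if_neg hlt, if_neg hlt]
      congr 2
      exact (PySem.Int.mod_eq_emod_of_pos (by norm_num)).symm
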